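-- pv_equiv track=rewrite | github.com/kou1215/mahjong_Application | models/game.py | _effective_meld_tiles_count
-- ===== SOURCE A (Python) =====
-- from typing import List, Optional, Dict, Any
--
-- def _effective_meld_tiles_count(melds: List[List[str]]) -> int:
-- 	"""和了計算上の副露枚数を返す（カンは3枚相当として扱う）。"""
-- 	count = 0
-- 	for meld in melds:
-- 		if len(meld) == 4:
-- 			count += 3
-- 		else:
-- 			count += len(meld)
-- 	return count
-- ===== SOURCE B (Python) =====
-- from typing import List
--
-- def _effective_meld_tiles_count(melds: List[List[str]]) -> int:
--     total = sum(len(m) for m in melds)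
--     kans = sum(1 for m in melds if len(m) == 4)
--     return total - kans
-- ===== Notes on version B (the rewrite author's own statement) =====
-- stated objective: simpler
-- what changed: Replaces the per-meld branch-and-accumulate loop with two aggregate sums (total tile count and number of kans) and a single subtraction, using that each kan over-counts by exactly 1.
import Mathlib
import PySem

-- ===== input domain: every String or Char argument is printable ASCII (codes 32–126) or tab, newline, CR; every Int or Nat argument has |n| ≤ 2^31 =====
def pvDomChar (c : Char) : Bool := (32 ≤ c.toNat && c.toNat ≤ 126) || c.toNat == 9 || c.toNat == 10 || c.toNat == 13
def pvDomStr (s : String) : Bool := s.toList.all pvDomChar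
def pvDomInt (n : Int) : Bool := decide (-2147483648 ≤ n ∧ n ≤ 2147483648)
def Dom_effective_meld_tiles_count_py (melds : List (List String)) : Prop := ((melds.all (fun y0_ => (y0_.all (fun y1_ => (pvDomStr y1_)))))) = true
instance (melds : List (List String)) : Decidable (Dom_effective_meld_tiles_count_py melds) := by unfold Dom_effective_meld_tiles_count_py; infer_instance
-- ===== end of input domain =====

-- ===== PORT A =====
-- B: two aggregate sums (total tiles, number of kans) and one subtraction, instead of A's per-meld branch; objective: simpler.
def effective_meld_tiles_count_py (melds : List (List String)) : Int :=
  melds.foldl (fun count meld =>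
    if meld.length = 4 then count + 3 else count + (meld.length : Int)) 0

-- ===== PORT B =====
def effective_meld_tiles_count_py_alt (melds : List (List String)) : Int :=
  let total : Int := ((melds.map (fun m => (m.length : Int))).sum)
  let kans : Int := ((melds.filter (fun m => m.length = 4)).length : Int)
  total - kans

-- ===== PRECONDITION & SPEC =====
def Spec_effective_meld_tiles_count_py (melds : List (List String)) (out : Int) : Prop := out = effective_meld_tiles_count_py_alt melds
instance (melds : List (List String)) (out : Int) : Decidable (Spec_effective_meld_tiles_count_py melds out) := by unfold Spec_effective_meld_tiles_count_py; infer_instance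

-- ===== CLAIM (what is proved, stated in full; the proofs are below) =====
def Claim_equal_effective_meld_tiles_count_py : Prop := ∀ (melds : List (List String)), Dom_effective_meld_tiles_count_py melds → Spec_effective_meld_tiles_count_py melds (effective_meld_tiles_count_py melds)

-- ===== LEMMAS AND PROOFS =====

-- ===== VERDICT (by name: the statement is the Claim_ definition above) =====
theorem pv_foldl_shift (melds : List (List String)) (c : Int) :
    melds.foldl (fun count meld =>
      if meld.length = 4 then count + 3 else count + (meld.length : Int)) c
    = c + ((melds.map (fun m => (m.length : Int))).sum)
        - ((melds.filter (fun m => m.length = 4)).length : Int) := by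
  induction melds generalizing c with
  | nil => simp
  | cons h t ih =>
    simp only [List.foldl_cons, List.map_cons, List.sum_cons, List.filter_cons]
    by_cases hl : h.length = 4
    · rw [ih]; simp [hl]; ring
    · rw [ih]; simp [hl]; ring

theorem effective_meld_tiles_count_py_spec : Claim_equal_effective_meld_tiles_count_py := by
  intro melds _
  unfold Spec_effective_meld_tiles_count_py effective_meld_tiles_count_py effective_meld_tiles_count_py_alt
  rw [pv_foldl_shift]
  simp
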